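-- pv_equiv track=rewrite | github.com/sumiya11/ttax | ttax/compile.py | apply_single_mapping
-- ===== SOURCE A (Python) =====
-- def apply_single_mapping(strings, mapping):
--   new_strings = []
--   for str in strings:
--     curr_str = ''
--     for l in str:
--       curr_str += mapping.get(l, l)
--     new_strings.append(curr_str)
--   return new_strings
-- ===== SOURCE B (Python) =====
-- def apply_single_mapping(strings, mapping):
--   table = {ord(k): v for k, v in mapping.items() if len(k) == 1}
--   return [s.translate(table) for s in strings]
-- ===== Notes on version B (the rewrite author's own statement) =====
-- stated objective: idiomatic
-- what changed: Precomputes a str.translate table (ordinal -> replacement) once from the single-character keys of the mapping, then translates each string with one library pass, instead of per-character dict.get lookups with repeated string concatenation.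
import Mathlib
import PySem

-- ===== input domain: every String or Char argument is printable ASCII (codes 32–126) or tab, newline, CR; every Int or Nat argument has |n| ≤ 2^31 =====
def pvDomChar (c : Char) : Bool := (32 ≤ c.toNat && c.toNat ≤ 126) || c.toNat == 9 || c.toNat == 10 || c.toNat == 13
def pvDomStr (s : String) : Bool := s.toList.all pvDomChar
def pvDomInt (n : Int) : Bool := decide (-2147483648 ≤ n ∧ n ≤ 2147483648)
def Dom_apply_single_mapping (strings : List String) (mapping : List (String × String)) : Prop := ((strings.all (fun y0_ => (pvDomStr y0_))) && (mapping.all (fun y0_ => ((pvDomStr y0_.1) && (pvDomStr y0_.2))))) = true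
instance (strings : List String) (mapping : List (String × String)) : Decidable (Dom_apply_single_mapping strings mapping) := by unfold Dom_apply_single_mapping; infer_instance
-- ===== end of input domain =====

-- B builds one translation table keyed by single characters and translates each string in a single library pass,
-- instead of A's per-character dict lookups with repeated string concatenation (objective: idiomatic).


-- ===== PORT A =====
-- mapping is a Python dict; its association list becomes a PySem.Dict, then A's nested loops:
-- for each string, append mapping.get(l, l) character by character.
def apply_single_mapping (strings : List String) (mapping : List (String × String)) : List String :=
  let d := PySem.Dict.ofList mapping
  strings.foldl
    (fun new_strings str =>
      new_strings ++
        [String.ofList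
          (str.toList.foldl
            (fun curr_str l => curr_str ++ (d.getD (String.ofList [l]) (String.ofList [l])).toList)
            [])])
    []

-- ===== PORT B =====
-- str.translate table with a Char key: characters without an entry map to themselves.
def pyTranslate (table : PySem.Dict Char String) (s : String) : String :=
  String.ofList (s.toList.flatMap (fun c => (table.getD c (String.ofList [c])).toList))

-- table = {ord(k): v for k, v in mapping.items() if len(k) == 1}; then [s.translate(table) for s in strings]
def apply_single_mapping_alt (strings : List String) (mapping : List (String × String)) : List String :=
  let table := mapping.foldl
    (fun t p => if p.1.toList.length = 1 then t.insert (p.1.toList.headD ' ') p.2 else t)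
    PySem.Dict.empty
  strings.map (pyTranslate table)

-- ===== PRECONDITION & SPEC =====
def Spec_apply_single_mapping (strings : List String) (mapping : List (String × String)) (out : List String) : Prop := out = apply_single_mapping_alt strings mapping
instance (strings : List String) (mapping : List (String × String)) (out : List String) : Decidable (Spec_apply_single_mapping strings mapping out) := by unfold Spec_apply_single_mapping; infer_instance

-- ===== CLAIM (what is proved, stated in full; the proofs are below) =====
def Claim_equal_apply_single_mapping : Prop := ∀ (strings : List String) (mapping : List (String × String)), Dom_apply_single_mapping strings mapping → Spec_apply_single_mapping strings mapping (apply_single_mapping strings mapping)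

-- ===== LEMMAS AND PROOFS =====

-- A's full-dict lookup at a single-character key agrees with B's Char-keyed table lookup,
-- for any pair of accumulator dicts that already agree at that key.
theorem lookup_agree (l : List (String × String)) (c : Char) (dflt : String)
    (dA : PySem.Dict String String) (dB : PySem.Dict Char String)
    (h : dA.getD (String.ofList [c]) dflt = dB.getD c dflt) :
    (l.foldl (fun acc p => acc.insert p.1 p.2) dA).getD (String.ofList [c]) dflt
      = (l.foldl (fun t p => if p.1.toList.length = 1 then t.insert (p.1.toList.headD ' ') p.2 else t) dB).getD c dflt := by
  induction l generalizing dA dB with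
  | nil => simpa using h
  | cons p rest ih =>
    simp only [List.foldl_cons]
    apply ih
    by_cases hk : p.1 = String.ofList [c]
    · rw [hk]
      simp
    · rw [PySem.Dict.getD_insert, if_neg (fun he => hk he.symm)]
      split_ifs with hlen
      · rw [PySem.Dict.getD_insert]
        have hne : c ≠ p.1.toList.headD ' ' := by
          intro he
          apply hk
          have : p.1.toList = [c] := by
            cases hL : p.1.toList with
            | nil => simp [hL] at hlen
            | cons a as =>
              cases as with
              | nil => simp [hL] at he ⊢; simp [he]
              | cons b bs => simp [hL] at hlen
          rw [← this]
          exact String.ofList_toList.symm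
        rw [if_neg hne]
        exact h
      · exact h

-- A's inner character loop is exactly B's translate of that string.
theorem inner_eq (s : String) (mapping : List (String × String)) :
    String.ofList
      (s.toList.foldl
        (fun curr_str l =>
          curr_str ++ ((PySem.Dict.ofList mapping).getD (String.ofList [l]) (String.ofList [l])).toList)
        [])
      = pyTranslate
          (mapping.foldl
            (fun t p => if p.1.toList.length = 1 then t.insert (p.1.toList.headD ' ') p.2 else t)
            PySem.Dict.empty) s := by
  unfold pyTranslate
  rw [PySem.List.foldl_append_eq_flatMap]
  congr 1
  simp only [List.nil_append]
  apply List.flatMap_congr  -- pointwise equality of the per-character replacement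
  intro c _
  congr 1
  have := lookup_agree mapping c (String.ofList [c]) PySem.Dict.empty PySem.Dict.empty (by simp [PySem.Dict.getD_empty])
  simpa [PySem.Dict.ofList, PySem.Dict.update] using this

-- ===== VERDICT (by name: the statement is the Claim_ definition above) =====
theorem apply_single_mapping_spec : Claim_equal_apply_single_mapping := by
  intro strings mapping _
  unfold Spec_apply_single_mapping apply_single_mapping apply_single_mapping_alt
  rw [PySem.List.foldl_append_singleton_eq_map]
  simp only [List.nil_append]
  exact List.map_congr_left (fun s _ => inner_eq s mapping)
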